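-- pv_equiv track=rewrite | github.com/mbh038/PE | PE_0581/donReble.py | squareFrees
-- ===== SOURCE A (Python) =====
-- SmallPrimes = ( 2, 3, 5, 7, 11, 13, 17, 19, 23, 29, 31, 37, 41, 43, 47,
--     53, 59, 61, 67, 71, 73, 79, 83, 89, 97, 101, 103, 107, 109, 113 )
--
-- def squareFrees(maxpr, product, pindex):
--     pr = SmallPrimes[pindex]
--     if pr < maxpr:
--         for val in squareFrees(maxpr, product, pindex+1):
--             yield val
--         for val in squareFrees(maxpr, product*pr, pindex+1):
--             yield val
--     else:
--         yield product
--         yield product*maxpr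
-- ===== SOURCE B (Python) =====
-- SmallPrimes = ( 2, 3, 5, 7, 11, 13, 17, 19, 23, 29, 31, 37, 41, 43, 47,
--     53, 59, 61, 67, 71, 73, 79, 83, 89, 97, 101, 103, 107, 109, 113 )
--
-- def squareFrees(maxpr, product, pindex):
--     # collect the active primes iteratively, then enumerate subsets by bit mask
--     primes = []
--     i = pindex
--     while SmallPrimes[i] < maxpr:
--         primes.append(SmallPrimes[i])
--         i += 1
--     primes.append(maxpr)
--     n = len(primes)
--     for mask in range(1 << n):
--         value = product
--         for j in range(n):
--             if mask & (1 << (n - 1 - j)):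
--                 value *= primes[j]
--         yield value
-- ===== Notes on version B (the rewrite author's own statement) =====
-- stated objective: alternative
-- what changed: Replaced the double-recursive generator with an iterative collection of the active primes followed by a single loop over bit masks 0..2^n-1, where the first prime is the high bit, so each yielded value is computed directly from its mask.
import Mathlib
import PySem

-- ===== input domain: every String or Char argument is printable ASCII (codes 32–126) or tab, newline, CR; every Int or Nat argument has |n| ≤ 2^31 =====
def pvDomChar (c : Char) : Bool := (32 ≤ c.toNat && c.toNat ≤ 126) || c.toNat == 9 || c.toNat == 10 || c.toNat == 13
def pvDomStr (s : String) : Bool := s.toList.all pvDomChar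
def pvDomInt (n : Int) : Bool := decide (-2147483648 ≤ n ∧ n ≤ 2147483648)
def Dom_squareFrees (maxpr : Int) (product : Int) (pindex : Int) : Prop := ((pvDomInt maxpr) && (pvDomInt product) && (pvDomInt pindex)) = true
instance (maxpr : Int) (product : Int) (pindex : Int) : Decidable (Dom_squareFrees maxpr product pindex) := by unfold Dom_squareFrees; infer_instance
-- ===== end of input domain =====

-- B replaces A's double-recursive generator by an iterative prime collection plus a single
-- loop over bit masks (first prime = high bit), yielding the same values in the same order.

def smallPrimes : List Int :=
  [2, 3, 5, 7, 11, 13, 17, 19, 23, 29, 31, 37, 41, 43, 47,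
   53, 59, 61, 67, 71, 73, 79, 83, 89, 97, 101, 103, 107, 109, 113]

-- used by both ports' termination proofs: a successful Python index into SmallPrimes is < 30
theorem pyGet_smallPrimes_lt (i : Int) (pr : Int)
    (h : PySem.List.pyGet? smallPrimes i = some pr) : i < 30 := by
  by_contra hc
  rw [(PySem.List.pyGet?_eq_none_iff smallPrimes i).2
    (by simp [PySem.Raise.InRange, smallPrimes]; omega)] at h
  simp at h

-- ===== PORT A =====
-- A's recursion; where Python raises IndexError (pyGet? = none) the port returns []
-- (those inputs are excluded by Pre_squareFrees).
def squareFrees (maxpr : Int) (product : Int) (pindex : Int) : List Int :=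
  match h : PySem.List.pyGet? smallPrimes pindex with
  | none => []
  | some pr =>
    if pr < maxpr then
      squareFrees maxpr product (pindex + 1) ++ squareFrees maxpr (product * pr) (pindex + 1)
    else
      [product, product * maxpr]
termination_by (30 - pindex).toNat
decreasing_by
  all_goals
    have := pyGet_smallPrimes_lt pindex pr h
    omega

-- ===== PORT B =====
-- while SmallPrimes[i] < maxpr: primes.append(SmallPrimes[i]); i += 1
-- (pyGet? = none is Python's IndexError; excluded by Pre_squareFrees)
def collectPrimes (maxpr : Int) (i : Int) : List Int :=
  match h : PySem.List.pyGet? smallPrimes i with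
  | none => []
  | some p =>
    if p < maxpr then p :: collectPrimes maxpr (i + 1) else []
termination_by (30 - i).toNat
decreasing_by
  all_goals
    have := pyGet_smallPrimes_lt i p h
    omega

-- inner loop: for j, p in enumerate(primes): if mask & (1 << (n - 1 - j)): value *= p
def maskValue (primes : List Int) (n : Nat) (product : Int) (mask : Nat) : Int :=
  (PySem.List.enumerate primes 0).foldl
    (fun v jp => if mask &&& (1 <<< (n - 1 - jp.1.toNat)) ≠ 0 then v * jp.2 else v) product

def squareFrees_alt (maxpr : Int) (product : Int) (pindex : Int) : List Int :=
  let primes := collectPrimes maxpr pindex ++ [maxpr]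
  let n := primes.length
  (List.range (2 ^ n)).map (maskValue primes n product)

-- ===== PRECONDITION & SPEC =====
-- Pre_ = exactly the inputs on which the Python A returns: the start index must be inside the
-- 30-element tuple (Python's negative indices included), and the index walk must stop before
-- running off the end, which it does iff maxpr ≤ 113 = max(SmallPrimes); otherwise A raises
-- IndexError (and B, which indexes the tuple the same way, raises it too).
def Pre_squareFrees (maxpr : Int) (product : Int) (pindex : Int) : Prop :=
  -30 ≤ pindex ∧ pindex < 30 ∧ maxpr ≤ 113
instance (maxpr : Int) (product : Int) (pindex : Int) : Decidable (Pre_squareFrees maxpr product pindex) := by unfold Pre_squareFrees; infer_instance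

def pvWitness_squareFrees : Int × Int × Int := (10, 1, 0)

def Spec_squareFrees (maxpr : Int) (product : Int) (pindex : Int) (out : List Int) : Prop := out = squareFrees_alt maxpr product pindex
instance (maxpr : Int) (product : Int) (pindex : Int) (out : List Int) : Decidable (Spec_squareFrees maxpr product pindex out) := by unfold Spec_squareFrees; infer_instance

-- ===== CLAIM (what is proved, stated in full; the proofs are below) =====
def Claim_equal_squareFrees : Prop := ∀ (maxpr : Int) (product : Int) (pindex : Int), Dom_squareFrees maxpr product pindex → Pre_squareFrees maxpr product pindex → Spec_squareFrees maxpr product pindex (squareFrees maxpr product pindex)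

-- ===== LEMMAS AND PROOFS =====

-- A's recursion tree, abstracted over the list of collected active primes
def genList (maxpr : Int) (ps : List Int) (product : Int) : List Int :=
  match ps with
  | [] => [product, product * maxpr]
  | p :: rest => genList maxpr rest product ++ genList maxpr rest (product * p)

-- bit facts for splitting masks at the high bit
theorem bit_low {k x : Nat} (h : x < 2 ^ k) : x &&& (1 <<< k) = 0 := by
  rw [Nat.one_shiftLeft, Nat.and_two_pow, Nat.testBit_lt_two_pow h]
  simp

theorem bit_high {k x : Nat} (h : x < 2 ^ k) : (2 ^ k + x) &&& (1 <<< k) ≠ 0 := by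
  rw [Nat.one_shiftLeft, Nat.and_two_pow, Nat.testBit_two_pow_add_eq, Nat.testBit_lt_two_pow h]
  simp

theorem bit_same {j k : Nat} (x : Nat) (h : j < k) :
    ((2 ^ k + x) &&& (1 <<< j) ≠ 0) = (x &&& (1 <<< j) ≠ 0) := by
  rw [Nat.one_shiftLeft, Nat.and_two_pow, Nat.and_two_pow, Nat.testBit_two_pow_add_gt h]

theorem enum_shift {α : Type} (l : List α) (s : Int) :
    PySem.List.enumerate l (s + 1) = (PySem.List.enumerate l s).map (fun p => (p.1 + 1, p.2)) := by
  induction l generalizing s with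
  | nil => simp [PySem.List.enumerate_nil]
  | cons x xs ih => simp [PySem.List.enumerate_cons, ih]

-- head prime's bit (the high bit) clear: the head is skipped
theorem maskValue_cons_low (p : Int) (l : List Int) (product : Int) (mask : Nat)
    (hm : mask < 2 ^ l.length) :
    maskValue (p :: l) (l.length + 1) product mask = maskValue l l.length product mask := by
  unfold maskValue
  rw [PySem.List.enumerate_cons, List.foldl_cons]
  rw [show (0:Int) + 1 = 0 + 1 from rfl, enum_shift, List.foldl_map]
  simp only [Int.toNat_zero, Nat.sub_zero, Nat.add_sub_cancel, bit_low hm]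
  rw [if_neg (by simp)]
  apply PySem.List.foldl_congr_mem
  intro acc q hq
  obtain ⟨k, hk, rfl⟩ := (PySem.List.mem_enumerate_iff l 0 q).1 hq
  simp only [zero_add, Int.toNat_natCast]
  rw [show ((k:Int) + 1).toNat = k + 1 from by omega,
      show l.length - (k + 1) = l.length - 1 - k from by omega]

-- head prime's bit set: the head multiplies in, lower bits unchanged
theorem maskValue_cons_high (p : Int) (l : List Int) (product : Int) (mask : Nat)
    (hm : mask < 2 ^ l.length) :
    maskValue (p :: l) (l.length + 1) product (2 ^ l.length + mask)
      = maskValue l l.length (product * p) mask := by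
  unfold maskValue
  rw [PySem.List.enumerate_cons, List.foldl_cons]
  rw [show (0:Int) + 1 = 0 + 1 from rfl, enum_shift, List.foldl_map]
  simp only [Int.toNat_zero, Nat.sub_zero, Nat.add_sub_cancel, if_pos (bit_high hm)]
  apply PySem.List.foldl_congr_mem
  intro acc q hq
  obtain ⟨k, hk, rfl⟩ := (PySem.List.mem_enumerate_iff l 0 q).1 hq
  simp only [zero_add]
  rw [show ((k:Int) + 1).toNat = k + 1 from by omega,
      show l.length - (k + 1) = l.length - 1 - k from by omega,
      Int.toNat_natCast]
  simp only [bit_same mask (show l.length - 1 - k < l.length from by omega)]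

-- A's recursion tree over ps equals B's mask enumeration over ps ++ [maxpr]
theorem gen_eq_masks (maxpr : Int) (ps : List Int) : ∀ (product : Int),
    genList maxpr ps product
      = (List.range (2 ^ (ps.length + 1))).map
          (maskValue (ps ++ [maxpr]) (ps.length + 1) product) := by
  induction ps with
  | nil =>
    intro product
    rw [show List.range (2 ^ (List.length ([] : List Int) + 1)) = [0, 1] from by decide]
    norm_num [genList, maskValue, PySem.List.enumerate_cons, PySem.List.enumerate_nil]
  | cons p rest ih =>
    intro product
    have hlen : (rest ++ [maxpr]).length = rest.length + 1 := by simp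
    rw [show (p :: rest).length + 1 = (rest.length + 1) + 1 from by simp]
    rw [Nat.two_pow_succ, List.range_add, List.map_append, List.map_map]
    show genList maxpr rest product ++ genList maxpr rest (product * p) = _
    rw [ih product, ih (product * p)]
    congr 1
    · apply List.map_congr_left
      intro mask hmask
      rw [List.mem_range] at hmask
      have := maskValue_cons_low p (rest ++ [maxpr]) product mask (by rw [hlen]; exact hmask)
      rw [hlen] at this
      exact this.symm
    · apply List.map_congr_left
      intro mask hmask
      rw [List.mem_range] at hmask
      have := maskValue_cons_high p (rest ++ [maxpr]) product mask (by rw [hlen]; exact hmask)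
      rw [hlen] at this
      simpa using this.symm

-- inside Pre_, A's recursion unrolls to genList over the collected primes
theorem A_eq_gen (maxpr : Int) : ∀ (fuel : Nat) (pindex product : Int),
    (30 - pindex).toNat ≤ fuel → -30 ≤ pindex → pindex < 30 → maxpr ≤ 113 →
    squareFrees maxpr product pindex = genList maxpr (collectPrimes maxpr pindex) product := by
  intro fuel
  induction fuel with
  | zero => intro pindex product hf h1 h2 h3; omega
  | succ f ih =>
    intro pindex product hf h1 h2 h3
    rw [squareFrees, collectPrimes]
    have hin : PySem.Raise.InRange smallPrimes.length pindex := by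
      simp [PySem.Raise.InRange, smallPrimes]; omega
    obtain ⟨pr, hget⟩ : ∃ pr, PySem.List.pyGet? smallPrimes pindex = some pr := by
      cases hg : PySem.List.pyGet? smallPrimes pindex with
      | none => exact absurd hin ((PySem.List.pyGet?_eq_none_iff smallPrimes pindex).1 hg)
      | some pr => exact ⟨pr, rfl⟩
    rw [hget]
    dsimp only
    by_cases hlt : pr < maxpr
    · rw [if_pos hlt, if_pos hlt]
      have hne : pindex ≠ 29 ∧ pindex ≠ -1 := by
        constructor <;> rintro rfl <;>
          · rw [show PySem.List.pyGet? smallPrimes _ = some 113 from by decide] at hget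
            simp at hget
            omega
      rw [genList]
      rw [ih (pindex + 1) product (by omega) (by omega) (by omega) h3,
          ih (pindex + 1) (product * pr) (by omega) (by omega) (by omega) h3]
    · rw [if_neg hlt, if_neg hlt, genList]

-- ===== VERDICT (by name: the statement is the Claim_ definition above) =====
theorem squareFrees_spec : Claim_equal_squareFrees := by
  intro maxpr product pindex _hdom hpre
  obtain ⟨h1, h2, h3⟩ := hpre
  show squareFrees maxpr product pindex = squareFrees_alt maxpr product pindex
  rw [A_eq_gen maxpr (30 - pindex).toNat pindex product le_rfl h1 h2 h3, gen_eq_masks]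
  simp [squareFrees_alt]
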